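-- pv_equiv track=rewrite | github.com/nwnzk1/Priprava-na-zk | Python/Trochu-slozizejsi-ulohy/Algoritmizace_py0-4.py | frekvence_prvnich_pismen
-- ===== SOURCE A (Python) =====
-- import string
--
-- def frekvence_prvnich_pismen(retezec:str):
--     unikatni_slovo:list[str] = []
--     kontrola_duplicity = set()
--     slovnik: dict[str, int] = {}
--
--     # string.punctuation = tabulka se znaky
--     # .translate() = aplikuj to na vytvořený retezec
--     # str.maketrans("tento znak", "nahrad tímto znakem", "odstran tyto znaky")
--     cisty_retezec = retezec.lower().translate(str.maketrans('', '', string.punctuation))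
--     slova = cisty_retezec.split()
--
--     for slovo in slova:
--         if slovo not in kontrola_duplicity:
--             unikatni_slovo.append(slovo)
--             kontrola_duplicity.add(slovo)
--
--     for slovo in unikatni_slovo:
--         prvni_pismeno = slovo[0]
--
--         if prvni_pismeno in slovnik:
--             slovnik[prvni_pismeno] += 1
--         else:
--             slovnik[prvni_pismeno] = 1
--
--     return slovnik
-- ===== SOURCE B (Python) =====
-- import string
--
-- def frekvence_prvnich_pismen(retezec: str):
--     # one grouping pass: first letter -> set of distinct cleaned words starting with it
--     cisty_retezec = retezec.lower().translate(str.maketrans('', '', string.punctuation))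
--     pismena: dict[str, set] = {}
--     for slovo in cisty_retezec.split():
--         pismena.setdefault(slovo[0], set()).add(slovo)
--     return {pismeno: len(slova) for pismeno, slova in pismena.items()}
-- ===== Notes on version B (the rewrite author's own statement) =====
-- stated objective: simpler
-- what changed: Replaces A's two passes (a global dedup list built with an auxiliary seen-set, then a counting loop over it) by a single grouping pass that maps each first letter to the set of distinct words starting with it, returning the set sizes.
import Mathlib
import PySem

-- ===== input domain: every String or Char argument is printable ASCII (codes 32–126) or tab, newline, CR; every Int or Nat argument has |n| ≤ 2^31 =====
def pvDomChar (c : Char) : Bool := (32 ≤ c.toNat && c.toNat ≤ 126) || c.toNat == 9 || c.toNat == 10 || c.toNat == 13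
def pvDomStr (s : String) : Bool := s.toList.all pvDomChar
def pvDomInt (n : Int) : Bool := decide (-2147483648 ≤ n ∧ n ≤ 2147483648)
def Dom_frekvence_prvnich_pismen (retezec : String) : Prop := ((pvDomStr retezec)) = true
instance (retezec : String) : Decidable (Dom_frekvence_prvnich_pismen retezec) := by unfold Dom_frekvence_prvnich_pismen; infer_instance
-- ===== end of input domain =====

-- B replaces A's global dedup-list pass plus counting pass by ONE grouping pass into a
-- dict of per-letter word sets (objective: simpler); return value only, no argument is mutated.

-- shared cleaning line of both Pythons:
-- retezec.lower().translate(str.maketrans('', '', string.punctuation)).split()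
-- string.punctuation is exactly the ASCII codes 33–47, 58–64, 91–96, 123–126.
def pvPunct (c : Char) : Bool :=
  (33 ≤ c.toNat && c.toNat ≤ 47) || (58 ≤ c.toNat && c.toNat ≤ 64) ||
  (91 ≤ c.toNat && c.toNat ≤ 96) || (123 ≤ c.toNat && c.toNat ≤ 126)

def pvSlova (retezec : String) : List (List Char) :=
  PySem.Chars.split₀ ((PySem.Chars.lower retezec.toList).filter (fun c => !pvPunct c))

-- slovo[0] as a 1-character string; none = IndexError (unreachable: split() words are nonempty)
def pvPrvni (slovo : List Char) : Option String :=
  (PySem.List.pyGet? slovo 0).map (fun c => String.mk [c])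

-- ===== PORT A =====
def frekvence_prvnich_pismen (retezec : String) : List (String × Int) :=
  -- first loop: global dedup (unikatni_slovo list + kontrola_duplicity set kept in sync);
  -- second loop: count first letters of the unique words; return slovnik.items
  (((pvSlova retezec).foldl
      (fun (st : List (List Char) × PySem.Set (List Char)) slovo =>
        if PySem.Set.contains st.2 slovo then st
        else (st.1 ++ [slovo], PySem.Set.add st.2 slovo))
      ([], PySem.Set.empty)).1.foldl
    (fun (d : PySem.Dict String Int) slovo =>
      match pvPrvni slovo with
      | some p => if d.contains p then d.insert p (d.getD p 0 + 1) else d.insert p 1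
      | none => d)
    PySem.Dict.empty).items

-- ===== PORT B =====
def frekvence_prvnich_pismen_alt (retezec : String) : List (String × Int) :=
  -- one grouping pass: pismena.setdefault(slovo[0], set()).add(slovo); then
  -- {pismeno: len(slova) for pismeno, slova in pismena.items()}
  ((pvSlova retezec).foldl
      (fun (d : PySem.Dict String (PySem.Set (List Char))) slovo =>
        match pvPrvni slovo with
        | some p => d.modify p PySem.Set.empty (fun s => PySem.Set.add s slovo)
        | none => d)
      PySem.Dict.empty).items.map (fun p => (p.1, PySem.Set.len p.2))

-- ===== PRECONDITION & SPEC =====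
def Spec_frekvence_prvnich_pismen (retezec : String) (out : List (String × Int)) : Prop := out = frekvence_prvnich_pismen_alt retezec
instance (retezec : String) (out : List (String × Int)) : Decidable (Spec_frekvence_prvnich_pismen retezec out) := by unfold Spec_frekvence_prvnich_pismen; infer_instance

-- ===== CLAIM (what is proved, stated in full; the proofs are below) =====
def Claim_equal_frekvence_prvnich_pismen : Prop := ∀ (retezec : String), Dom_frekvence_prvnich_pismen retezec → Spec_frekvence_prvnich_pismen retezec (frekvence_prvnich_pismen retezec)

-- ===== LEMMAS AND PROOFS =====

theorem pvSet_add_pos {a : Type} [BEq a] (s : PySem.Set a) (x : a)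
    (h : PySem.Set.contains s x = true) : PySem.Set.add s x = s := by
  unfold PySem.Set.add; rw [if_pos h]

theorem pvSet_add_neg {a : Type} [BEq a] (s : PySem.Set a) (x : a)
    (h : ¬ PySem.Set.contains s x = true) : PySem.Set.add s x = s ++ [x] := by
  unfold PySem.Set.add; rw [if_neg h]

-- A's first loop keeps list and set identical; its state is Set.update of the input
theorem pvA_state (l : List (List Char)) (s : PySem.Set (List Char)) :
    l.foldl
      (fun (st : List (List Char) × PySem.Set (List Char)) slovo =>
        if PySem.Set.contains st.2 slovo then st
        else (st.1 ++ [slovo], PySem.Set.add st.2 slovo)) (s, s)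
    = (PySem.Set.update s l, PySem.Set.update s l) := by
  induction l generalizing s with
  | nil => rfl
  | cons x l ih =>
    show List.foldl
      (fun (st : List (List Char) × PySem.Set (List Char)) slovo =>
        if PySem.Set.contains st.2 slovo then st
        else (st.1 ++ [slovo], PySem.Set.add st.2 slovo))
      (if PySem.Set.contains s x = true then (s, s)
       else (s ++ [x], PySem.Set.add s x)) l
      = (PySem.Set.update (PySem.Set.add s x) l, PySem.Set.update (PySem.Set.add s x) l)
    by_cases h : PySem.Set.contains s x = true
    · rw [if_pos h, pvSet_add_pos s x h]; exact ih s
    · rw [if_neg h, pvSet_add_neg s x h]; exact ih (s ++ [x])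

-- A's counting step is Dict.modify
theorem pvA_step (d : PySem.Dict String Int) (p : String) :
    (if d.contains p then d.insert p (d.getD p 0 + 1) else d.insert p 1)
    = d.modify p 0 (fun v => v + 1) := by
  by_cases h : d.contains p = true
  · rw [if_pos h]; rfl
  · rw [if_neg h]
    show d.insert p 1 = d.insert p (d.getD p 0 + 1)
    rw [PySem.Dict.getD_of_not_contains d 0 (by simpa using h)]
    norm_num

-- A's second loop is the counter fold over the (defined) first letters
theorem pvA_fold (l : List (List Char)) (d : PySem.Dict String Int) :
    l.foldl
      (fun (d : PySem.Dict String Int) slovo =>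
        match pvPrvni slovo with
        | some p => if d.contains p then d.insert p (d.getD p 0 + 1) else d.insert p 1
        | none => d) d
    = (l.filterMap pvPrvni).foldl (fun d x => d.modify x 0 (fun v => v + 1)) d := by
  induction l generalizing d with
  | nil => rfl
  | cons x l ih =>
    cases h : pvPrvni x with
    | none => simp only [List.foldl_cons, List.filterMap_cons, h]; exact ih d
    | some p =>
      simp only [List.foldl_cons, List.filterMap_cons, h]
      rw [pvA_step d p]
      exact ih _

-- B's pass: value at key c collects exactly the words whose first letter is c
theorem pvB_getD (l : List (List Char)) (d : PySem.Dict String (PySem.Set (List Char))) (c : String) :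
    ((l.foldl
      (fun (d : PySem.Dict String (PySem.Set (List Char))) slovo =>
        match pvPrvni slovo with
        | some p => d.modify p PySem.Set.empty (fun s => PySem.Set.add s slovo)
        | none => d) d).getD c PySem.Set.empty)
    = PySem.Set.update (d.getD c PySem.Set.empty)
        (l.filter (fun w => pvPrvni w == some c)) := by
  induction l generalizing d with
  | nil => rfl
  | cons x l ih =>
    cases h : pvPrvni x with
    | none =>
      simp only [List.foldl_cons, h]
      rw [List.filter_cons_of_neg (by simp [h]), ih]
    | some p =>
      by_cases hpc : p = c
      · subst hpc
        simp only [List.foldl_cons, h]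
        rw [List.filter_cons_of_pos (by simp [h]), ih, PySem.Dict.getD_modify_self]
        rfl
      · have hne : c ≠ p := fun hc => hpc hc.symm
        simp only [List.foldl_cons, h]
        rw [List.filter_cons_of_neg (by simp [h, hpc]), ih,
          PySem.Dict.getD_modify_of_ne d PySem.Set.empty _ hne]

theorem pvKeys_modify (d : PySem.Dict String (PySem.Set (List Char))) (p : String)
    (f : PySem.Set (List Char) → PySem.Set (List Char)) :
    (d.modify p PySem.Set.empty f).keys = PySem.Set.add d.keys p := by
  by_cases h : d.contains p = true
  · rw [PySem.Dict.keys_modify, PySem.Dict.keys_insert_of_contains d _ h,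
      pvSet_add_pos d.keys p (by
        rw [PySem.Set.contains_iff]
        exact (PySem.Dict.contains_iff_mem_keys d p).mp h)]
  · rw [PySem.Dict.keys_modify, PySem.Dict.keys_insert_of_not_contains d _ (by simpa using h),
      pvSet_add_neg d.keys p (by
        rw [PySem.Set.contains_iff]
        intro hm
        exact h ((PySem.Dict.contains_iff_mem_keys d p).mpr hm))]

-- B's pass: keys are the first letters in order of first appearance
theorem pvB_keys (l : List (List Char)) (d : PySem.Dict String (PySem.Set (List Char))) :
    ((l.foldl
      (fun (d : PySem.Dict String (PySem.Set (List Char))) slovo =>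
        match pvPrvni slovo with
        | some p => d.modify p PySem.Set.empty (fun s => PySem.Set.add s slovo)
        | none => d) d).keys)
    = PySem.Set.update d.keys (l.filterMap pvPrvni) := by
  induction l generalizing d with
  | nil => rfl
  | cons x l ih =>
    cases h : pvPrvni x with
    | none => simp only [List.foldl_cons, List.filterMap_cons, h]; exact ih d
    | some p =>
      simp only [List.foldl_cons, List.filterMap_cons, h]
      rw [ih, pvKeys_modify]
      rfl

theorem pvUpdate_empty (xs : List String) :
    PySem.Set.update ([] : PySem.Set String) xs = PySem.Set.ofList xs := by
  rw [PySem.Set.ofList_eq_foldl]; rfl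

theorem pvUpdate_empty' (xs : List (List Char)) :
    PySem.Set.update ([] : PySem.Set (List Char)) xs = PySem.Set.ofList xs := by
  rw [PySem.Set.ofList_eq_foldl]; rfl

-- ordered dedup relative to a seen-set
def pvDedupFrom (s : PySem.Set (List Char)) : List (List Char) → List (List Char)
  | [] => []
  | x :: l => if PySem.Set.contains s x then pvDedupFrom s l else x :: pvDedupFrom (PySem.Set.add s x) l

theorem pvDedupFrom_cons_pos (s : PySem.Set (List Char)) (x : List Char) (l : List (List Char))
    (h : PySem.Set.contains s x = true) :
    pvDedupFrom s (x :: l) = pvDedupFrom s l := by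
  simp only [pvDedupFrom]; rw [if_pos h]

theorem pvDedupFrom_cons_neg (s : PySem.Set (List Char)) (x : List Char) (l : List (List Char))
    (h : ¬ PySem.Set.contains s x = true) :
    pvDedupFrom s (x :: l) = x :: pvDedupFrom (PySem.Set.add s x) l := by
  simp only [pvDedupFrom]; rw [if_neg h]

theorem pvUpdate_eq_append_dedupFrom (l : List (List Char)) (s : PySem.Set (List Char)) :
    PySem.Set.update s l = s ++ pvDedupFrom s l := by
  induction l generalizing s with
  | nil => simp [PySem.Set.update, pvDedupFrom]
  | cons x l ih =>
    show PySem.Set.update (PySem.Set.add s x) l = s ++ pvDedupFrom s (x :: l)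
    by_cases h : PySem.Set.contains s x = true
    · rw [pvSet_add_pos s x h, pvDedupFrom_cons_pos s x l h, ih s]
    · rw [pvSet_add_neg s x h, pvDedupFrom_cons_neg s x l h, ih (s ++ [x]),
        pvSet_add_neg s x h, List.append_assoc]
      rfl

theorem pvOfList_dedupFrom (l : List (List Char)) :
    PySem.Set.ofList l = pvDedupFrom ([] : PySem.Set (List Char)) l := by
  rw [PySem.Set.ofList_eq_foldl]
  have h := pvUpdate_eq_append_dedupFrom l ([] : PySem.Set (List Char))
  rw [PySem.Set.update] at h
  simpa using h

-- key set of the deduped words = key set of all words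
theorem pvKeysets (l : List (List Char)) (s : PySem.Set (List Char)) (t : PySem.Set String)
    (hst : ∀ x k, PySem.Set.contains s x = true → pvPrvni x = some k → PySem.Set.contains t k = true) :
    PySem.Set.update t ((pvDedupFrom s l).filterMap pvPrvni)
    = PySem.Set.update t (l.filterMap pvPrvni) := by
  induction l generalizing s t with
  | nil => rfl
  | cons x l ih =>
    by_cases h : PySem.Set.contains s x = true
    · rw [pvDedupFrom_cons_pos s x l h]
      cases hx : pvPrvni x with
      | none => rw [List.filterMap_cons_none hx, ih s t hst]
      | some k =>
        have ht : PySem.Set.contains t k = true := hst x k h hx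
        rw [List.filterMap_cons_some hx,
          show PySem.Set.update t (k :: l.filterMap pvPrvni)
            = PySem.Set.update (PySem.Set.add t k) (l.filterMap pvPrvni) from rfl,
          pvSet_add_pos t k ht]
        exact ih s t hst
    · rw [pvDedupFrom_cons_neg s x l h]
      cases hx : pvPrvni x with
      | none =>
        have hst' : ∀ y k, PySem.Set.contains (PySem.Set.add s x) y = true →
            pvPrvni y = some k → PySem.Set.contains t k = true := by
          intro y k hy hk
          rw [pvSet_add_neg s x h] at hy
          rw [PySem.Set.contains_iff] at hy
          rcases List.mem_append.mp hy with hy' | hy'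
          · exact hst y k ((PySem.Set.contains_iff s y).mpr hy') hk
          · have : y = x := by simpa using hy'
            subst this; rw [hx] at hk; cases hk
        rw [List.filterMap_cons_none hx, List.filterMap_cons_none hx,
          ih (PySem.Set.add s x) t hst']
      | some k =>
        have hst' : ∀ y k', PySem.Set.contains (PySem.Set.add s x) y = true →
            pvPrvni y = some k' → PySem.Set.contains (PySem.Set.add t k) k' = true := by
          intro y k' hy hk'
          rw [pvSet_add_neg s x h] at hy
          rw [PySem.Set.contains_iff] at hy
          rcases List.mem_append.mp hy with hy' | hy'
          · have := hst y k' ((PySem.Set.contains_iff s y).mpr hy') hk'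
            rw [PySem.Set.contains_iff] at this ⊢
            exact (PySem.Set.mem_add t k k').mpr (Or.inl this)
          · have : y = x := by simpa using hy'
            subst this; rw [hx] at hk'
            cases hk'
            rw [PySem.Set.contains_iff]
            exact (PySem.Set.mem_add t k k).mpr (Or.inr rfl)
        rw [List.filterMap_cons_some hx, List.filterMap_cons_some hx]
        show PySem.Set.update (PySem.Set.add t k) ((pvDedupFrom (PySem.Set.add s x) l).filterMap pvPrvni)
          = PySem.Set.update (PySem.Set.add t k) (l.filterMap pvPrvni)
        exact ih (PySem.Set.add s x) (PySem.Set.add t k) hst'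

-- filtering commutes with ordered dedup
theorem pvDedupFrom_filter (p : List Char → Bool) (l : List (List Char)) (s : PySem.Set (List Char)) :
    pvDedupFrom (s.filter p) (l.filter p) = (pvDedupFrom s l).filter p := by
  induction l generalizing s with
  | nil => rfl
  | cons x l ih =>
    have hc : p x = true → PySem.Set.contains (s.filter p) x = PySem.Set.contains s x := by
      intro hp
      by_cases hm : x ∈ s
      · have h1 : PySem.Set.contains (s.filter p) x = true :=
          (PySem.Set.contains_iff _ x).mpr (List.mem_filter.mpr ⟨hm, hp⟩)
        have h2 : PySem.Set.contains s x = true := (PySem.Set.contains_iff s x).mpr hm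
        rw [h1, h2]
      · have h1 : ¬ PySem.Set.contains (s.filter p) x = true := fun hcon =>
          hm (List.mem_filter.mp ((PySem.Set.contains_iff _ x).mp hcon)).1
        have h2 : ¬ PySem.Set.contains s x = true := fun hcon =>
          hm ((PySem.Set.contains_iff s x).mp hcon)
        rw [Bool.not_eq_true] at h1 h2
        rw [h1, h2]
    by_cases hp : p x = true
    · by_cases h : PySem.Set.contains s x = true
      · rw [List.filter_cons_of_pos hp, pvDedupFrom_cons_pos _ x _ (by rw [hc hp]; exact h),
          pvDedupFrom_cons_pos s x l h, ih s]
      · have hfadd : (PySem.Set.add s x).filter p = PySem.Set.add (s.filter p) x := by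
          rw [pvSet_add_neg s x h, List.filter_append, List.filter_cons_of_pos hp,
            pvSet_add_neg (s.filter p) x (by rw [hc hp]; exact h)]
          rfl
        rw [List.filter_cons_of_pos hp, pvDedupFrom_cons_neg _ x _ (by rw [hc hp]; exact h),
          pvDedupFrom_cons_neg s x l h, List.filter_cons_of_pos hp, ← hfadd, ih (PySem.Set.add s x)]
    · have hp' : p x = false := by simpa using hp
      by_cases h : PySem.Set.contains s x = true
      · rw [List.filter_cons_of_neg (by simp [hp']), pvDedupFrom_cons_pos s x l h, ih s]
      · have hfadd : (PySem.Set.add s x).filter p = s.filter p := by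
          rw [pvSet_add_neg s x h, List.filter_append, List.filter_cons_of_neg (by simp [hp'])]
          simp
        rw [List.filter_cons_of_neg (by simp [hp']), pvDedupFrom_cons_neg s x l h,
          List.filter_cons_of_neg (by simp [hp']), ← hfadd, ih (PySem.Set.add s x)]

-- counting a letter among the unique words' first letters = number of unique words with it
theorem pvCount (u : List (List Char)) (c : String) :
    List.count c (u.filterMap pvPrvni) = (u.filter (fun w => pvPrvni w == some c)).length := by
  induction u with
  | nil => rfl
  | cons x u ih =>
    cases h : pvPrvni x with
    | none =>
      have hf : (pvPrvni x == some c) = false := by simp [h]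
      rw [List.filterMap_cons_none h, List.filter_cons_of_neg (by simp [hf]), ih]
    | some p =>
      by_cases hpc : p = c
      · subst hpc
        rw [List.filterMap_cons_some h, List.filter_cons_of_pos (by simp [h]),
          List.count_cons_self, List.length_cons, ih]
      · rw [List.filterMap_cons_some h, List.filter_cons_of_neg (by simp [h, hpc])]
        simp [hpc, ih]

-- ===== VERDICT (by name: the statement is the Claim_ definition above) =====
theorem frekvence_prvnich_pismen_spec : Claim_equal_frekvence_prvnich_pismen := by
  unfold Claim_equal_frekvence_prvnich_pismen
  intro retezec _
  unfold Spec_frekvence_prvnich_pismen frekvence_prvnich_pismen frekvence_prvnich_pismen_alt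
  set ws := pvSlova retezec with hws
  -- A side
  have hempty : (([], PySem.Set.empty) : List (List Char) × PySem.Set (List Char))
      = (([] : PySem.Set (List Char)), ([] : PySem.Set (List Char))) := rfl
  rw [hempty, pvA_state, pvA_fold]
  have hu : PySem.Set.update ([] : PySem.Set (List Char)) ws = PySem.Set.ofList ws :=
    pvUpdate_empty' ws
  rw [hu]
  have hcounter :
      (((PySem.Set.ofList ws).filterMap pvPrvni).foldl
        (fun d x => d.modify x 0 (fun v => v + 1)) PySem.Dict.empty)
      = PySem.Dict.counter ((PySem.Set.ofList ws).filterMap pvPrvni) := rfl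
  rw [hcounter, PySem.Dict.items_counter]
  -- B side
  have hkeysB := pvB_keys ws PySem.Dict.empty
  rw [PySem.Dict.keys_empty, pvUpdate_empty] at hkeysB
  have hnodupB : (ws.foldl
      (fun (d : PySem.Dict String (PySem.Set (List Char))) slovo =>
        match pvPrvni slovo with
        | some p => d.modify p PySem.Set.empty (fun s => PySem.Set.add s slovo)
        | none => d) PySem.Dict.empty).keys.Nodup := by
    rw [hkeysB]; exact PySem.Set.nodup_ofList _
  rw [PySem.Dict.items_eq_map_keys _ hnodupB PySem.Set.empty, hkeysB, List.map_map]
  have hval : ∀ c : String,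
      ((ws.foldl
        (fun (d : PySem.Dict String (PySem.Set (List Char))) slovo =>
          match pvPrvni slovo with
          | some p => d.modify p PySem.Set.empty (fun s => PySem.Set.add s slovo)
          | none => d) PySem.Dict.empty).getD c PySem.Set.empty)
      = PySem.Set.ofList (ws.filter (fun w => pvPrvni w == some c)) := by
    intro c
    rw [pvB_getD, PySem.Dict.getD_empty]
    exact pvUpdate_empty' _
  -- keys agree
  have hdedup : PySem.Set.ofList ws = pvDedupFrom ([] : PySem.Set (List Char)) ws :=
    pvOfList_dedupFrom ws
  have hkeys : PySem.Set.ofList ((PySem.Set.ofList ws).filterMap pvPrvni)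
      = PySem.Set.ofList (ws.filterMap pvPrvni) := by
    rw [hdedup, ← pvUpdate_empty, ← pvUpdate_empty]
    exact pvKeysets ws ([] : PySem.Set (List Char)) ([] : PySem.Set String)
      (by intro x k h; simp [PySem.Set.contains] at h)
  rw [hkeys]
  -- values agree for every key
  apply List.map_congr_left
  intro c _
  have hfilter : (PySem.Set.ofList ws).filter (fun w => pvPrvni w == some c)
      = PySem.Set.ofList (ws.filter (fun w => pvPrvni w == some c)) := by
    rw [pvOfList_dedupFrom, pvOfList_dedupFrom]
    have := pvDedupFrom_filter (fun w => pvPrvni w == some c) ws ([] : PySem.Set (List Char))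
    simpa using this.symm
  simp only [hval c, Function.comp]
  rw [PySem.Set.len, ← hfilter, ← pvCount]
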